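-- pv_equiv track=rewrite | github.com/Elena2332/iabd | ia/pria/ejercicios03.py | tieneMasVocales
-- ===== SOURCE A (Python) =====
-- def esVocal(letra):
--     vocales = ['a','A','e','E','i','I','o','O','u','U']
--     if letra in vocales:
--         return True
--     else:
--         return False
--
-- def tieneMasVocales(palabra):
--     cantVocal = 0
--     for letra in palabra:
--         if esVocal(letra):   # reutilizo metodo del ejercicio2
--             cantVocal = cantVocal+1
--     if cantVocal > len(palabra)/2:
--         return True
--     else:
--         return False
-- ===== SOURCE B (Python) =====
-- def tieneMasVocales(palabra):
--     # Count occurrences of each of the 10 vowels with str.count (one pass per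
--     # vowel over the string), sum them, and compare twice the total with the
--     # length: more than half vowels iff 2 * vowels > len.
--     total = sum(palabra.count(v) for v in 'aAeEiIoOuU')
--     return 2 * total > len(palabra)
-- ===== Notes on version B (the rewrite author's own statement) =====
-- stated objective: alternative
-- what changed: Instead of A's single character scan with a per-character vowel membership helper, B makes ten str.count passes, one per vowel, sums the occurrence counts and compares twice the sum with the length (no per-character test, no division).
import Mathlib
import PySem

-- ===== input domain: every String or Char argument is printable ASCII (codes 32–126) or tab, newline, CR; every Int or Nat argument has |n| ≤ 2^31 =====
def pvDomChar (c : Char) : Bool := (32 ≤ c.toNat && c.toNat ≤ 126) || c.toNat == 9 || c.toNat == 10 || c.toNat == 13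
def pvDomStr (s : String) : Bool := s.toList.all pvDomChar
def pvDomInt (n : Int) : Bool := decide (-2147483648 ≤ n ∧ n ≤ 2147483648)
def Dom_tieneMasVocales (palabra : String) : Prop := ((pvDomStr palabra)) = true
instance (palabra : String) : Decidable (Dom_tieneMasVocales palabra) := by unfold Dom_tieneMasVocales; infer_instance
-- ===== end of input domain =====

-- B replaces A's character scan with a membership helper by ten str.count passes (one per vowel) summed and compared with the length (different traversal: per-vowel counting passes instead of a per-character scan).

-- ===== PORT A =====
def esVocal (letra : Char) : Bool :=
  let vocales : List Char := ['a','A','e','E','i','I','o','O','u','U']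
  if letra ∈ vocales then true else false

-- 'cantVocal > len(palabra)/2': Python compares the int counter with the exact float n/2;
-- since n/2 is exactly representable for these lengths this is exactly '2*cantVocal > n'.
def tieneMasVocales (palabra : String) : Bool :=
  let cantVocal : Int :=
    palabra.toList.foldl (fun c letra => if esVocal letra then c + 1 else c) 0
  if 2 * cantVocal > (palabra.toList.length : Int) then true else false

-- ===== PORT B =====
def tieneMasVocales_alt (palabra : String) : Bool :=
  let total : Nat :=
    ("aAeEiIoOuU".toList.map (fun v => PySem.Str.count palabra (String.singleton v))).sum
  decide (2 * total > palabra.toList.length)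

-- ===== PRECONDITION & SPEC =====
def Spec_tieneMasVocales (palabra : String) (out : Bool) : Prop := out = tieneMasVocales_alt palabra
instance (palabra : String) (out : Bool) : Decidable (Spec_tieneMasVocales palabra out) := by unfold Spec_tieneMasVocales; infer_instance

-- ===== CLAIM (what is proved, stated in full; the proofs are below) =====
def Claim_equal_tieneMasVocales : Prop := ∀ (palabra : String), Dom_tieneMasVocales palabra → Spec_tieneMasVocales palabra (tieneMasVocales palabra)

-- ===== LEMMAS AND PROOFS =====

-- Python str.count of a single character counts occurrences of that character.
theorem count_go_single (c : Char) : ∀ (l : List Char) (fuel acc : Nat), l.length ≤ fuel →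
    PySem.Chars.count.go [c] fuel l acc = acc + l.count c := by
  intro l
  induction l with
  | nil => intro fuel acc _; cases fuel <;> simp [PySem.Chars.count.go]
  | cons x xs ih =>
    intro fuel acc h
    cases fuel with
    | zero => simp at h
    | succ f =>
      rw [PySem.Chars.count.go]
      by_cases hx : x = c
      · simp [List.isPrefixOf, hx, ih _ _ (by simpa using h)]
        omega
      · simp [List.isPrefixOf, hx, Ne.symm hx, ih _ _ (by simpa using h)]

theorem str_count_single (s : String) (c : Char) :
    PySem.Str.count s (String.singleton c) = s.toList.count c := by
  rw [PySem.Str.count_eq, show (String.singleton c).toList = [c] by simp]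
  unfold PySem.Chars.count
  simp only [List.isEmpty_cons, Bool.false_eq_true, if_false]
  simpa using count_go_single c s.toList s.toList.length 0 le_rfl

-- The sum of 0/1 indicators of x over a list counts x's occurrences.
theorem sum_indicator (V : List Char) (x : Char) :
    (V.map fun v => if x = v then 1 else 0).sum = V.count x := by
  induction V with
  | nil => simp
  | cons y ys ih =>
    simp only [List.map_cons, List.sum_cons, List.count_cons, ih, beq_iff_eq]
    by_cases h : x = y
    · subst h; simp; omega
    · rw [if_neg h, if_neg (fun hh => h hh.symm)]; omega

-- Summing the per-vowel counts over a duplicate-free vowel list counts the vowel characters.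
theorem sum_counts (V : List Char) (hV : V.Nodup) : ∀ (l : List Char),
    (V.map (fun v => l.count v)).sum = l.countP (fun ch => decide (ch ∈ V)) := by
  intro l
  induction l with
  | nil => simp
  | cons x xs ih =>
    simp only [List.count_cons, List.countP_cons, beq_iff_eq]
    rw [List.sum_map_add, ih, sum_indicator]
    by_cases hm : x ∈ V
    · simp [hm, List.count_eq_one_of_mem hV hm]
    · simp [hm, List.count_eq_zero_of_not_mem hm]

-- ===== VERDICT (by name: the statement is the Claim_ definition above) =====
theorem tieneMasVocales_spec : Claim_equal_tieneMasVocales := by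
  intro palabra _
  unfold Spec_tieneMasVocales tieneMasVocales tieneMasVocales_alt
  simp only [str_count_single]
  rw [sum_counts "aAeEiIoOuU".toList (by decide) palabra.toList]
  rw [PySem.List.foldl_if_add_one]
  have hcp : palabra.toList.countP esVocal
      = palabra.toList.countP (fun ch => decide (ch ∈ "aAeEiIoOuU".toList)) := by
    apply List.countP_congr
    intro ch _
    simp [esVocal, show "aAeEiIoOuU".toList = ['a','A','e','E','i','I','o','O','u','U'] from rfl]
  rw [hcp]
  by_cases h : 2 * palabra.toList.countP (fun ch => decide (ch ∈ "aAeEiIoOuU".toList))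
      > palabra.toList.length
  · simp [h]; omega
  · simp [h]; push_cast at h ⊢; omega
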